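-- pv_equiv track=rewrite | github.com/Mike124892/GeoVis | temp.py | assign_levels
-- ===== SOURCE A (Python) =====
-- def assign_levels(features, quantiles):
--     for feature in features:
--         population = feature['properties']['population']
--         for i in range(len(quantiles) - 1):
--             if quantiles[i] <= population <= quantiles[i + 1]:
--                 feature['properties']['heatmap_level'] = i + 1
--                 break
--     return features
-- ===== SOURCE B (Python) =====
-- def assign_levels(features, quantiles):
--     # Loop order inverted: instead of scanning the quantile intervals per
--     # feature, sweep the intervals once in order and tag every still-unassigned
--     # population that falls in the current interval (first interval wins, as in
--     # the original); then write the levels back in one final pass (mutating the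
--     # feature dicts in place, like the original).
--     pops = [f['properties']['population'] for f in features]
--     levels = [None] * len(features)
--     for i, (lo, hi) in enumerate(zip(quantiles, quantiles[1:])):
--         levels = [i + 1 if l is None and lo <= p <= hi else l
--                   for l, p in zip(levels, pops)]
--     for f, lvl in zip(features, levels):
--         if lvl is not None:
--             f['properties']['heatmap_level'] = lvl
--     return features
-- ===== Notes on version B (the rewrite author's own statement) =====
-- stated objective: alternative
-- what changed: B inverts the loop nesting: instead of scanning the quantile intervals inside a per-feature loop with break, it sweeps the intervals once in increasing order and tags every still-unassigned population in the current interval (first interval wins), then writes the levels back in a final pass.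
import Mathlib
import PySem

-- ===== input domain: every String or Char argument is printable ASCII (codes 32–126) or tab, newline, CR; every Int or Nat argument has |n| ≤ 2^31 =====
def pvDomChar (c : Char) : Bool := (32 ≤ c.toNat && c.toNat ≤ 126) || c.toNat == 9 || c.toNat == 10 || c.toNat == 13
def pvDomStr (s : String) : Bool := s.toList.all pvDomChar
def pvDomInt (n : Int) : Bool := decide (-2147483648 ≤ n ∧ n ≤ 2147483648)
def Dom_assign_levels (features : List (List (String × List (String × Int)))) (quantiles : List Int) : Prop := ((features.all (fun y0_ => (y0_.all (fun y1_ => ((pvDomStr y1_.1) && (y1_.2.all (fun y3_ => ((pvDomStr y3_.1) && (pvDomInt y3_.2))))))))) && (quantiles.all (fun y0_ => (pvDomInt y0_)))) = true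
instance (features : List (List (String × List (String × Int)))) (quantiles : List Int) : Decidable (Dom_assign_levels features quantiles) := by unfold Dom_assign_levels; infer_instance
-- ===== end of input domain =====

-- B returns the same value as A by inverting the loop nesting (interval-major
-- sweep instead of a per-feature interval scan); both mutate the feature dicts
-- in place in the same way, the claim proved here is about the returned value.

-- ===== PORT A =====
-- inner loop: for i in range(len(quantiles)-1): if quantiles[i] <= p <= quantiles[i+1]: level = i+1, break
def aScan (quantiles : List Int) (population : Int) : List Int → Option Int
  | [] => none
  | i :: rest =>
    match PySem.List.pyGet? quantiles i, PySem.List.pyGet? quantiles (i + 1) with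
    | some lo, some hi =>
        if lo ≤ population ∧ population ≤ hi then some (i + 1)
        else aScan quantiles population rest
    | _, _ => none   -- unreachable: range indices are in bounds

def aFeature (quantiles : List Int) (feature : List (String × List (String × Int))) : List (String × List (String × Int)) :=
  match (PySem.Dict.mk feature).get? "properties" with
  | none => feature        -- KeyError in Python: excluded by Pre_
  | some props =>
    match (PySem.Dict.mk props).get? "population" with
    | none => feature      -- KeyError in Python: excluded by Pre_
    | some population =>
      match aScan quantiles population (PySem.List.pyRange 0 ((quantiles.length : Int) - 1) 1) with
      | none => feature
      | some lvl =>
          ((PySem.Dict.mk feature).insert "properties"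
            ((PySem.Dict.mk props).insert "heatmap_level" lvl).items).items

def assign_levels (features : List (List (String × List (String × Int)))) (quantiles : List Int) : List (List (String × List (String × Int))) :=
  features.map (aFeature quantiles)

-- ===== PORT B =====
-- pops = [f['properties']['population'] for f in features]; none marks a KeyError input (excluded by Pre_)
def bGetPop (feature : List (String × List (String × Int))) : Option Int :=
  match (PySem.Dict.mk feature).get? "properties" with
  | none => none
  | some props => (PySem.Dict.mk props).get? "population"

-- one interval sweep: levels = [i+1 if l is None and lo <= p <= hi else l for l, p in zip(levels, pops)]
def bInner (lo hi lvl : Int) (lp : List (Option Int × Option Int)) : List (Option Int) :=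
  lp.map (fun x =>
    match x.2 with
    | none => x.1            -- unreachable under Pre_
    | some p => if x.1 = none ∧ lo ≤ p ∧ p ≤ hi then some lvl else x.1)

-- outer loop: for i, (lo, hi) in enumerate(zip(quantiles, quantiles[1:]))
def bOuter (pops : List (Option Int)) : List (Int × Int) → Int → List (Option Int) → List (Option Int)
  | [], _, levels => levels
  | (lo, hi) :: rest, i, levels => bOuter pops rest (i + 1) (bInner lo hi (i + 1) (levels.zip pops))

-- final pass: if lvl is not None: f['properties']['heatmap_level'] = lvl
def bAssign (fl : (List (String × List (String × Int))) × Option Int) : List (String × List (String × Int)) :=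
  match fl.2 with
  | none => fl.1
  | some lvl =>
    match (PySem.Dict.mk fl.1).get? "properties" with
    | none => fl.1           -- unreachable: lvl exists only if the keys existed
    | some props =>
        ((PySem.Dict.mk fl.1).insert "properties"
          ((PySem.Dict.mk props).insert "heatmap_level" lvl).items).items

def assign_levels_alt (features : List (List (String × List (String × Int)))) (quantiles : List Int) : List (List (String × List (String × Int))) :=
  (features.zip
    (bOuter (features.map bGetPop) (quantiles.zip quantiles.tail) 0
      (features.map (fun _ => none)))).map bAssign

-- ===== PRECONDITION & SPEC =====
-- Pre_ excludes exactly the inputs on which the Python raises KeyError: a feature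
-- without a 'properties' dict or whose 'properties' dict lacks a 'population' key.
def Pre_assign_levels (features : List (List (String × List (String × Int)))) (quantiles : List Int) : Prop :=
  features.all (fun feature =>
    match (PySem.Dict.mk feature).get? "properties" with
    | none => false
    | some props => ((PySem.Dict.mk props).get? "population").isSome) = true

instance (features : List (List (String × List (String × Int)))) (quantiles : List Int) : Decidable (Pre_assign_levels features quantiles) := by unfold Pre_assign_levels; infer_instance

def pvWitness_assign_levels : (List (List (String × List (String × Int)))) × List Int :=
  ([[("properties", [("population", 5)])], [("properties", [("population", 42), ("heatmap_level", 9)])]], [0, 10, 100])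

def Spec_assign_levels (features : List (List (String × List (String × Int)))) (quantiles : List Int) (out : List (List (String × List (String × Int)))) : Prop := out = assign_levels_alt features quantiles
instance (features : List (List (String × List (String × Int)))) (quantiles : List Int) (out : List (List (String × List (String × Int)))) : Decidable (Spec_assign_levels features quantiles out) := by unfold Spec_assign_levels; infer_instance

-- ===== CLAIM (what is proved, stated in full; the proofs are below) =====
def Claim_equal_assign_levels : Prop := ∀ (features : List (List (String × List (String × Int)))) (quantiles : List Int), Dom_assign_levels features quantiles → Pre_assign_levels features quantiles → Spec_assign_levels features quantiles (assign_levels features quantiles)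

-- ===== LEMMAS AND PROOFS =====

-- first-match scan over interval pairs with a counter (proof-side characterisation)
def firstM (p : Int) : List (Int × Int) → Int → Option Int
  | [], _ => none
  | (lo, hi) :: rest, i =>
      if lo ≤ p ∧ p ≤ hi then some (i + 1) else firstM p rest (i + 1)

-- A's indexed scan over range(len(q)-1) equals the first-match scan over zip(q, q[1:])
theorem scan_eq (q : List Int) (p : Int) : ∀ (k i : Nat), q.length - i ≤ k →
    aScan q p (PySem.List.pyRange (i : Int) ((q.length : Int) - 1) 1)
      = firstM p ((q.drop i).zip (q.drop i).tail) (i : Int) := by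
  intro k
  induction k with
  | zero =>
    intro i hi
    rw [PySem.List.pyRange_one_eq_nil (by omega),
        List.drop_eq_nil_of_le (by omega), List.zip_nil_left]
    rfl
  | succ k ih =>
    intro i hi
    by_cases hlt : i + 1 < q.length
    · have hi0 : i < q.length := by omega
      rw [PySem.List.pyRange_one_cons (by omega)]
      rw [List.drop_eq_getElem_cons hi0, List.tail_cons, List.drop_eq_getElem_cons hlt,
          List.zip_cons_cons]
      have hg1 : PySem.List.pyGet? q (i : Int) = some q[i] := by
        rw [PySem.List.pyGet?_natCast, List.getElem?_eq_getElem hi0]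
      have hg2 : PySem.List.pyGet? q ((i : Int) + 1) = some q[i + 1] := by
        rw [show ((i : Int) + 1) = ((i + 1 : Nat) : Int) by push_cast; ring,
            PySem.List.pyGet?_natCast, List.getElem?_eq_getElem hlt]
      simp only [aScan, hg1, hg2, firstM]
      split_ifs with h
      · rfl
      · have heq := ih (i + 1) (by omega)
        rw [show ((i + 1 : Nat) : Int) = (i : Int) + 1 by push_cast; ring] at heq
        rw [heq, List.tail_drop, List.drop_eq_getElem_cons hlt]
    · have h2 : List.drop (i + 1) q = [] := List.drop_eq_nil_of_le (by omega)
      rw [PySem.List.pyRange_one_eq_nil (by omega), List.tail_drop, h2,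
          List.zip_nil_right]
      rfl

-- the per-slot result of the interval-major sweep
def sweepVal (ps : List (Int × Int)) (c : Int) (x : Option Int × Option Int) : Option Int :=
  match x.2, x.1 with
  | some p, none => firstM p ps c
  | _, _ => x.1

-- the interval-major sweep computes, in every slot, the first-match scan
theorem bOuter_eq (pops : List (Option Int)) :
    ∀ (ps : List (Int × Int)) (c : Int) (s : List (Option Int)), s.length ≤ pops.length →
    bOuter pops ps c s = (s.zip pops).map (sweepVal ps c) := by
  intro ps
  induction ps with
  | nil =>
    intro c s hs
    have : (s.zip pops).map (sweepVal [] c) = (s.zip pops).map Prod.fst := by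
      apply List.map_congr_left
      intro x _
      unfold sweepVal
      rcases x with ⟨l, p?⟩
      cases p? <;> cases l <;> simp [firstM]
    rw [bOuter, this, List.map_fst_zip hs]
  | cons q rest ih =>
    intro c s hs
    rcases q with ⟨lo, hi⟩
    rw [bOuter, ih (c + 1) _ (by simp [bInner])]
    -- both sides are maps over zips with the same pops; compare pointwise
    clear ih
    induction s generalizing pops with
    | nil => simp [bInner]
    | cons l s' ihs =>
      cases pops with
      | nil => simp at hs
      | cons p? pops' =>
        simp only [List.zip_cons_cons, bInner, List.map_cons]
        congr 1
        · -- head element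
          cases p? with
          | none => rfl
          | some p =>
            cases l with
            | none =>
              by_cases h : lo ≤ p ∧ p ≤ hi
              · simp [sweepVal, firstM, h]
              · simp [sweepVal, firstM, h]
            | some v => simp [sweepVal]
        · -- tails
          have := ihs pops' (by simpa using Nat.le_of_succ_le_succ (by simpa using hs))
          simpa [bInner] using this

-- ===== VERDICT (by name: the statement is the Claim_ definition above) =====
theorem assign_levels_spec : Claim_equal_assign_levels := by
  intro features quantiles hd hp
  clear hd hp
  unfold Spec_assign_levels assign_levels assign_levels_alt
  rw [bOuter_eq _ _ 0 _ (by simp)]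
  induction features with
  | nil => rfl
  | cons f rest ih =>
    simp only [List.map_cons, List.zip_cons_cons]
    congr 1
    · -- one feature: A's per-feature scan = B's slot value + final assignment
      unfold aFeature bAssign sweepVal bGetPop
      cases hprops : (PySem.Dict.mk f).get? "properties" with
      | none => simp
      | some props =>
        simp only []
        cases hpop : (PySem.Dict.mk props).get? "population" with
        | none => simp
        | some p =>
          simp only []
          have hscan := scan_eq quantiles p quantiles.length 0 (by omega)
          simp only [Nat.cast_zero, List.drop_zero] at hscan
          rw [hscan]
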